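-- pv_equiv track=rewrite | github.com/sven-7/Pathfinder-1e---Content-Database | src/character_creator/ability_scores.py | apply_racial_mods
-- ===== SOURCE A (Python) =====
-- def apply_racial_mods(
--     scores: dict[str, int], ability_mods: dict[str, int]
-- ) -> dict[str, int]:
--     """Apply racial ability modifiers to a score dict. Returns a new dict."""
--     result = dict(scores)
--     for ability, mod in ability_mods.items():
--         key = ability.lower()
--         if key in result:
--             result[key] = result[key] + mod
--     return result
-- ===== SOURCE B (Python) =====
-- def apply_racial_mods(
--     scores: dict[str, int], ability_mods: dict[str, int]
-- ) -> dict[str, int]: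
--     """Apply racial ability modifiers to a score dict. Returns a new dict."""
--     totals = {}
--     for ability, mod in ability_mods.items():
--         key = ability.lower()
--         totals[key] = totals.get(key, 0) + mod
--     return {k: v + totals.get(k, 0) for k, v in scores.items()}
-- ===== Notes on version B (the rewrite author's own statement) =====
-- stated objective: alternative
-- what changed: Instead of mutating a copy of scores while iterating over ability_mods, B first aggregates the lowercased modifiers into a totals table (summing on duplicate lowercased keys) and then builds the result in one comprehension pass over scores, adding the looked-up total to each value.
import Mathlib
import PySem

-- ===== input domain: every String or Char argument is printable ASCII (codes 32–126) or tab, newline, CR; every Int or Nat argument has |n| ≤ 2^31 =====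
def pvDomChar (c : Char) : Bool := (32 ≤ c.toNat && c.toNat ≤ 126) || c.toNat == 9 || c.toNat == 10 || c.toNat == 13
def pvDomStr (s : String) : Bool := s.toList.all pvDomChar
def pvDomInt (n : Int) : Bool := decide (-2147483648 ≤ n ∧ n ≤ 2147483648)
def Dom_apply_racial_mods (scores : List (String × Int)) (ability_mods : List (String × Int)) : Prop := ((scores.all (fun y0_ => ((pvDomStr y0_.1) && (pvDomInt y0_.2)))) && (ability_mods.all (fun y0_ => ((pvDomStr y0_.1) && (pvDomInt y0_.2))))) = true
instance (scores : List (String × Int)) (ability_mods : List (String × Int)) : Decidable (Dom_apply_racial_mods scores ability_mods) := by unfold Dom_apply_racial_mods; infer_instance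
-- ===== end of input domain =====

-- B inverts the traversal: it precomputes a summed table of lowercased modifiers, then maps once
-- over the score dict adding the looked-up total — same cost, different decomposition.

-- ===== PORT A =====
-- result = dict(scores); for ability, mod in ability_mods.items(): key = ability.lower();
--   if key in result: result[key] = result[key] + mod
def apply_racial_mods (scores : List (String × Int)) (ability_mods : List (String × Int)) : List (String × Int) :=
  let result := PySem.Dict.ofList scores
  let result := (PySem.Dict.ofList ability_mods).items.foldl
    (fun r p =>
      let key := PySem.Str.lower p.1
      match r.get? key with
      | some v => r.insert key (v + p.2)
      | none => r) result
  result.items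

-- ===== PORT B =====
-- totals = {}; for ability, mod in ability_mods.items(): key = ability.lower();
--   totals[key] = totals.get(key, 0) + mod
-- return {k: v + totals.get(k, 0) for k, v in scores.items()}
def apply_racial_mods_alt (scores : List (String × Int)) (ability_mods : List (String × Int)) : List (String × Int) :=
  let totals := (PySem.Dict.ofList ability_mods).items.foldl
    (fun t p =>
      let key := PySem.Str.lower p.1
      t.insert key (t.getD key 0 + p.2)) PySem.Dict.empty
  (PySem.Dict.ofList scores).items.map (fun p => (p.1, p.2 + totals.getD p.1 0))

-- ===== PRECONDITION & SPEC =====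
def Spec_apply_racial_mods (scores : List (String × Int)) (ability_mods : List (String × Int)) (out : List (String × Int)) : Prop := out = apply_racial_mods_alt scores ability_mods
instance (scores : List (String × Int)) (ability_mods : List (String × Int)) (out : List (String × Int)) : Decidable (Spec_apply_racial_mods scores ability_mods out) := by unfold Spec_apply_racial_mods; infer_instance

-- ===== CLAIM (what is proved, stated in full; the proofs are below) =====
def Claim_equal_apply_racial_mods : Prop := ∀ (scores : List (String × Int)) (ability_mods : List (String × Int)), Dom_apply_racial_mods scores ability_mods → Spec_apply_racial_mods scores ability_mods (apply_racial_mods scores ability_mods)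

-- ===== LEMMAS AND PROOFS =====

-- proof-side names for the two loop bodies (definitionally equal to the lambdas in the ports)
def pvStepA (r : PySem.Dict String Int) (p : String × Int) : PySem.Dict String Int :=
  match r.get? (PySem.Str.lower p.1) with
  | some v => r.insert (PySem.Str.lower p.1) (v + p.2)
  | none => r

def pvStepB (t : PySem.Dict String Int) (p : String × Int) : PySem.Dict String Int :=
  t.insert (PySem.Str.lower p.1) (t.getD (PySem.Str.lower p.1) 0 + p.2)

-- total modifier contributed to lowercased key k by the pair list L
def pvG (L : List (String × Int)) (k : String) : Int :=
  ((L.filter (fun p => PySem.Str.lower p.1 == k)).map (·.2)).sum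

theorem pvG_cons (p : String × Int) (L : List (String × Int)) (k : String) :
    pvG (p :: L) k = (if PySem.Str.lower p.1 = k then p.2 else 0) + pvG L k := by
  by_cases h : PySem.Str.lower p.1 = k <;> simp [pvG, h]

theorem pvA_get? (L : List (String × Int)) (r : PySem.Dict String Int) (k : String) :
    (L.foldl pvStepA r).get? k = (r.get? k).map (· + pvG L k) := by
  induction L generalizing r with
  | nil => simp [pvG]
  | cons p L ih =>
    rw [List.foldl_cons, ih, pvG_cons]
    unfold pvStepA
    cases hv : r.get? (PySem.Str.lower p.1) with
    | none =>
      by_cases h : PySem.Str.lower p.1 = k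
      · subst h; simp [hv]
      · simp [h]
    | some v =>
      by_cases h : PySem.Str.lower p.1 = k
      · subst h
        simp [PySem.Dict.get?_insert_self, hv]
        ring
      · rw [PySem.Dict.get?_insert_of_ne r _ (fun hh => h hh.symm)]
        simp [h]

theorem pvA_keys (L : List (String × Int)) (r : PySem.Dict String Int) :
    (L.foldl pvStepA r).keys = r.keys := by
  induction L generalizing r with
  | nil => rfl
  | cons p L ih =>
    rw [List.foldl_cons, ih]
    unfold pvStepA
    cases hv : r.get? (PySem.Str.lower p.1) with
    | none => rfl
    | some v =>
      exact PySem.Dict.keys_insert_of_contains r _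
        (by rw [PySem.Dict.contains_eq_isSome_get?, hv]; rfl)

theorem pvT_getD (L : List (String × Int)) (t : PySem.Dict String Int) (k : String) :
    (L.foldl pvStepB t).getD k 0 = t.getD k 0 + pvG L k := by
  induction L generalizing t with
  | nil => simp [pvG]
  | cons p L ih =>
    rw [List.foldl_cons, ih, pvG_cons]
    unfold pvStepB
    by_cases h : PySem.Str.lower p.1 = k
    · subst h
      simp [PySem.Dict.getD_insert_self]
      ring
    · rw [PySem.Dict.getD_insert_of_ne t _ _ (fun hh => h hh.symm)]
      simp [h]

-- ===== VERDICT (by name: the statement is the Claim_ definition above) =====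
theorem apply_racial_mods_spec : Claim_equal_apply_racial_mods := by
  intro scores ability_mods _
  unfold Spec_apply_racial_mods
  have eA : apply_racial_mods scores ability_mods =
      (((PySem.Dict.ofList ability_mods).items.foldl pvStepA
        (PySem.Dict.ofList scores)).items) := rfl
  have eB : apply_racial_mods_alt scores ability_mods =
      (PySem.Dict.ofList scores).items.map
        (fun p => (p.1, p.2 + ((PySem.Dict.ofList ability_mods).items.foldl pvStepB
          PySem.Dict.empty).getD p.1 0)) := rfl
  rw [eA, eB]
  set S := PySem.Dict.ofList scores with hS
  set M := (PySem.Dict.ofList ability_mods).items with hM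
  have hnd : S.keys.Nodup := PySem.Dict.nodup_keys_ofList scores
  have hndA : (M.foldl pvStepA S).keys.Nodup := by rw [pvA_keys]; exact hnd
  rw [PySem.Dict.items_eq_map_keys _ hndA 0, pvA_keys,
      PySem.Dict.items_eq_map_keys S hnd 0, List.map_map]
  apply List.map_congr_left
  intro k hkmem
  cases hv : S.get? k with
  | none =>
    exact absurd hkmem ((PySem.Dict.get?_eq_none_iff_not_mem_keys S k).mp hv)
  | some v =>
    have h1 : (M.foldl pvStepA S).getD k 0 = v + pvG M k := by
      rw [PySem.Dict.getD_eq_get?_getD, pvA_get?, hv]; rfl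
    have h2 : S.getD k 0 = v := PySem.Dict.getD_of_get?_eq_some S 0 hv
    have h3 : (M.foldl pvStepB PySem.Dict.empty).getD k 0 = pvG M k := by
      rw [pvT_getD]; simp
    simp [Function.comp, h1, h2, h3]
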